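-- pv_equiv track=rewrite | github.com/ripthetoilet/crypto-FB-9 | cp2/Dumiak_FB-94_Melnychenko_FB-94_CP2/lab2.py | div_text_on_block
-- ===== SOURCE A (Python) =====
-- def div_text_on_block(text, lenght):
--     rez = []
--     for j in range(0, lenght):
--         col = ""
--         for i in range(0, len(text)-j,lenght):
--                 col = col+text[i+j]
--         if col!="":
--             rez.append(col)
--         else:
--             continue
--     return rez
-- ===== SOURCE B (Python) =====
-- def div_text_on_block(text, lenght):
--     if lenght <= 0:
--         return []
--     buckets = [""] * lenght
--     for i, ch in enumerate(text):
--         buckets[i % lenght] += ch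
--     return [col for col in buckets if col != ""]
-- ===== Notes on version B (the rewrite author's own statement) =====
-- stated objective: faster
-- what changed: A scans the text once per column with a strided inner loop (plus an index computation per character); B makes a single linear pass over enumerate(text), appending each character to bucket i % lenght, then keeps the non-empty buckets.
import Mathlib
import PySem

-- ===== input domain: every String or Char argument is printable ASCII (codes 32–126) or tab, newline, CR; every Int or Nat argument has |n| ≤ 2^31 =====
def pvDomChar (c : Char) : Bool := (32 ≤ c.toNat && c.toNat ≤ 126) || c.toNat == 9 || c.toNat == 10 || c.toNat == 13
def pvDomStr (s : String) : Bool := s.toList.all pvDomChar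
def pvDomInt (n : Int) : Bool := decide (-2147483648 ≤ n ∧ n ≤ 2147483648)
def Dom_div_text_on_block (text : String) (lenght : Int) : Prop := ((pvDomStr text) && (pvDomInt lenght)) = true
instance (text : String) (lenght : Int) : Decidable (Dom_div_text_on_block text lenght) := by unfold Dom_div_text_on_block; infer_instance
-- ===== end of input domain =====

-- B replaces A's per-column strided re-scanning of the text by a single linear
-- distribution pass into lenght buckets (objective: faster, one pass instead of
-- one scan per column).


-- ===== PORT A =====
-- literal port of A: for j in range(0, lenght): gather text[i+j] for i in
-- range(0, len(text)-j, lenght); keep non-empty columns.  Strings are handled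
-- as List Char (col = col + text[i+j] is append of one char; String.ofList at the
-- end).  The `none` branch of pyGet? is unreachable: the loop bound keeps
-- 0 ≤ i + j < len(text), where Python's text[i+j] cannot raise.
def div_text_on_block (text : String) (lenght : Int) : List String :=
  ((PySem.List.pyRange 0 lenght 1).foldl (fun rez j =>
      let col := (PySem.List.pyRange 0 ((text.toList.length : Int) - j) lenght).foldl
        (fun col i =>
          match PySem.List.pyGet? text.toList (i + j) with
          | some c => col ++ [c]
          | none => col) ([] : List Char)
      if col ≠ [] then rez ++ [col] else rez) []).map (fun col => String.ofList col)

-- ===== PORT B =====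
-- literal port of B (Source B): guard lenght <= 0, then one pass over
-- enumerate(text) appending each char to bucket[i % lenght], finally keep the
-- non-empty buckets.  buckets[i % lenght]: i % lenght is Python's mod
-- (PySem.Int.mod), nonnegative here since lenght > 0, hence .toNat.
def div_text_on_block_alt (text : String) (lenght : Int) : List String :=
  if lenght ≤ 0 then []
  else
    let buckets := (PySem.List.enumerate text.toList 0).foldl
      (fun (bs : List (List Char)) ic =>
        let k := (PySem.Int.mod ic.1 lenght).toNat
        bs.set k (bs.getD k [] ++ [ic.2]))
      (List.replicate lenght.toNat ([] : List Char))
    (buckets.filter (fun col => col != [])).map (fun col => String.ofList col)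

-- ===== PRECONDITION & SPEC =====
def Spec_div_text_on_block (text : String) (lenght : Int) (out : List String) : Prop := out = div_text_on_block_alt text lenght
instance (text : String) (lenght : Int) (out : List String) : Decidable (Spec_div_text_on_block text lenght out) := by unfold Spec_div_text_on_block; infer_instance

-- ===== CLAIM (what is proved, stated in full; the proofs are below) =====
def Claim_equal_div_text_on_block : Prop := ∀ (text : String) (lenght : Int), Dom_div_text_on_block text lenght → Spec_div_text_on_block text lenght (div_text_on_block text lenght)

-- ===== LEMMAS AND PROOFS =====

-- column j of cs with block width L, starting at running index k:
-- the characters of cs whose (k + position) ≡ j (mod L), in order.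
def colFrom (L j : Nat) : Nat → List Char → List Char
  | _, [] => []
  | k, c :: cs => (if k % L = j then [c] else []) ++ colFrom L j (k + 1) cs

theorem colFrom_shift (L j : Nat) (cs : List Char) : ∀ k, colFrom L j (k + L) cs = colFrom L j k cs := by
  induction cs with
  | nil => intro k; rfl
  | cons c cs ih =>
    intro k
    simp only [colFrom, Nat.add_mod_right]
    rw [show k + L + 1 = (k + 1) + L by omega, ih]

theorem colFrom_nil_of_le (L j : Nat) (hj : j < L) (cs : List Char) :
    ∀ k, k + cs.length ≤ j → colFrom L j k cs = [] := by
  induction cs with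
  | nil => intro k _; rfl
  | cons c cs ih =>
    intro k hk
    simp only [List.length_cons] at hk
    have hkL : k % L = k := Nat.mod_eq_of_lt (by omega)
    simp only [colFrom, hkL, if_neg (by omega : ¬ k = j)]
    exact ih (k + 1) (by omega)

-- past the target column: the rest of the block contributes nothing
theorem colFrom_drop (L j : Nat) (_hj : j < L) (cs : List Char) :
    ∀ k, j < k → k ≤ L → colFrom L j k cs = colFrom L j 0 (cs.drop (L - k)) := by
  induction cs with
  | nil => intro k _ _; simp [colFrom]
  | cons c cs ih =>
    intro k hjk hkL
    rcases eq_or_lt_of_le hkL with hEq | hlt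
    · have hs := colFrom_shift L j (c :: cs) 0
      rw [hEq, Nat.sub_self, List.drop_zero]
      simpa using hs
    · have hkL' : k % L = k := Nat.mod_eq_of_lt hlt
      simp only [colFrom, hkL', if_neg (by omega : ¬ k = j)]
      rcases eq_or_lt_of_le (show k + 1 ≤ L by omega) with hEq1 | hlt1
      · have hs := colFrom_shift L j cs 0
        have hd : L - k = 1 := by omega
        rw [hEq1, hd]
        simpa using hs
      · rw [ih (k + 1) (by omega) (by omega)]
        have h1 : L - k = (L - (k + 1)) + 1 := by omega
        simp [h1]

-- peel the head of the column: cs[j-k] first, then the tail block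
theorem colFrom_peel (L j : Nat) (hj : j < L) (cs : List Char) :
    ∀ k, k ≤ j →
      colFrom L j k cs =
        (if j - k < cs.length then [cs.getD (j - k) ' '] else []) ++ colFrom L j 0 (cs.drop (L - k)) := by
  induction cs with
  | nil => intro k _; simp [colFrom]
  | cons c cs ih =>
    intro k hk
    rcases eq_or_lt_of_le hk with hEq | hlt
    · have hkL : k % L = k := Nat.mod_eq_of_lt (by omega)
      simp only [colFrom, hkL, if_pos hEq]
      rw [colFrom_drop L j hj cs (k + 1) (by omega) (by omega)]
      have h1 : L - k = (L - (k + 1)) + 1 := by omega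
      have h2 : j - k = 0 := by omega
      simp [h1, h2]
    · have hkL : k % L = k := Nat.mod_eq_of_lt (by omega)
      simp only [colFrom, hkL, if_neg (by omega : ¬ k = j)]
      rw [ih (k + 1) (by omega)]
      have h1 : L - k = (L - (k + 1)) + 1 := by omega
      have h2 : j - k = (j - (k + 1)) + 1 := by omega
      simp [h1, h2]

-- A's inner strided index list, turned into a map over List.range, equals colFrom
theorem map_range_eq_colFrom (L : Nat) (hL : 0 < L) :
    ∀ (n : Nat) (cs : List Char) (j : Nat), cs.length = n → j < L →
      (List.range (if (0 : Int) < (n : Int) - (j : Int) then ((((n : Int) - j + L - 1)) / L).toNat else 0)).map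
          (fun k => cs.getD (k * L + j) ' ') = colFrom L j 0 cs := by
  intro n
  induction n using Nat.strong_induction_on with
  | _ n ih =>
    intro cs j hlen hj
    by_cases hnj : (0 : Int) < (n : Int) - (j : Int)
    · have hjn : j < n := by exact_mod_cast (by omega : (j : Int) < (n : Int))
      have hLne : ((L : Int)) ≠ 0 := by exact_mod_cast hL.ne'
      have hq : ((n : Int) - j + L - 1) / L = ((n : Int) - j - 1) / L + 1 := by
        rw [show (n : Int) - j + L - 1 = ((n : Int) - j - 1) + 1 * L by ring,
          Int.add_mul_ediv_right _ _ hLne]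
      have hd0 : 0 ≤ ((n : Int) - j - 1) / L :=
        Int.ediv_nonneg (by omega) (by exact_mod_cast hL.le)
      rw [if_pos hnj, show (((n : Int) - j + L - 1) / L).toNat = (((n : Int) - j - 1) / L).toNat + 1 by omega,
        List.range_succ_eq_map]
      simp only [List.map_cons, List.map_map, Nat.zero_mul, Nat.zero_add]
      have hdropg : (fun k => cs.getD (k * L + j) ' ') ∘ Nat.succ =
          fun k => (cs.drop L).getD (k * L + j) ' ' := by
        funext k
        simp only [Function.comp_apply, List.getD_eq_getElem?_getD, List.getElem?_drop]
        congr 2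
        simp only [Nat.succ_mul]
        ring
      rw [hdropg]
      have hlen' : (cs.drop L).length = n - L := by simp [hlen]
      have ihc := ih (n - L) (by omega) (cs.drop L) j hlen' hj
      have hcnt : (((n : Int) - j - 1) / L).toNat =
          (if (0 : Int) < ((n - L : Nat) : Int) - (j : Int) then ((((n - L : Nat) : Int) - j + L - 1) / L).toNat else 0) := by
        by_cases hbig : j + L < n
        · have hcast : ((n - L : Nat) : Int) = (n : Int) - L := by
            have : L ≤ n := by omega
            push_cast [this]; ring
          rw [if_pos (by rw [hcast]; omega)]
          congr 2
          rw [hcast]; ring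
        · have hz : ((n : Int) - j - 1) / L = 0 :=
            Int.ediv_eq_zero_of_lt (by omega) (by omega)
          rw [hz]
          by_cases hc : (0 : Int) < ((n - L : Nat) : Int) - (j : Int)
          · exfalso
            have : (j : Int) < ((n - L : Nat) : Int) := by omega
            have hj' : j < n - L := by exact_mod_cast this
            omega
          · rw [if_neg hc]; rfl
      rw [hcnt, ihc]
      have hpeel := colFrom_peel L j hj cs 0 (Nat.zero_le _)
      rw [hpeel]
      simp [hlen, hjn]
    · rw [if_neg hnj]
      have hnle : n ≤ j := by exact_mod_cast (by omega : (n : Int) ≤ (j : Int))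
      simp only [List.range_zero, List.map_nil]
      exact (colFrom_nil_of_le L j hj cs 0 (by omega)).symm

-- A's column j (the inner foldl) equals colFrom L j 0 cs
theorem inner_eq_colFrom (L : Nat) (hL : 0 < L) (cs : List Char) (j : Nat) (hj : j < L) :
    (PySem.List.pyRange 0 ((cs.length : Int) - (j : Int)) (L : Int)).foldl
        (fun col i =>
          match PySem.List.pyGet? cs (i + (j : Int)) with
          | some c => col ++ [c]
          | none => col) ([] : List Char) = colFrom L j 0 cs := by
  rw [PySem.List.pyRange_of_pos _ _ (by exact_mod_cast hL : (0 : Int) < (L : Int))]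
  rw [List.foldl_map]
  simp only [sub_zero]
  rw [PySem.List.foldl_congr_mem _ _
    (fun (col : List Char) (k : Nat) => col ++ [cs.getD (k * L + j) ' ']) _ ?_]
  · rw [PySem.List.foldl_append_singleton_eq_map, List.nil_append]
    exact map_range_eq_colFrom L hL cs.length cs j rfl hj
  · intro acc k hk
    have hidx : k * L + j < cs.length := by
      by_cases hc : (0 : Int) < (cs.length : Int) - (j : Int)
      · rw [if_pos hc] at hk
        have hk' := List.mem_range.mp hk
        have h1 : (k : Int) < ((cs.length : Int) - j + L - 1) / L := by omega
        have h2 : ((k : Int) + 1) * L ≤ (cs.length : Int) - j + L - 1 :=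
          (Int.le_ediv_iff_mul_le (by exact_mod_cast hL)).mp (by omega)
        have h3 : ((k * L + j : Nat) : Int) < (cs.length : Int) := by
          push_cast
          nlinarith [h2]
        exact_mod_cast h3
      · rw [if_neg hc] at hk
        simp at hk
    have hcast : (0 : Int) + (L : Int) * (k : Int) + (j : Int) = ((k * L + j : Nat) : Int) := by
      push_cast; ring
    rw [hcast, PySem.List.pyGet?_natCast, List.getElem?_eq_getElem hidx]
    simp [List.getD_eq_getElem?_getD, List.getElem?_eq_getElem hidx]

-- B's bucket-distribution invariant
theorem buckets_invariant (L : Nat) (hL : 0 < L) :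
    ∀ (cs : List Char) (k : Nat) (bs : List (List Char)), bs.length = L →
      (PySem.List.enumerate cs (k : Int)).foldl
          (fun (bs : List (List Char)) ic =>
            let m := (PySem.Int.mod ic.1 (L : Int)).toNat
            bs.set m (bs.getD m [] ++ [ic.2])) bs =
        (List.range L).map (fun j => bs.getD j [] ++ colFrom L j k cs) := by
  intro cs
  induction cs with
  | nil =>
    intro k bs hlen
    simp only [PySem.List.enumerate_nil, List.foldl_nil, colFrom, List.append_nil]
    apply List.ext_getElem (by simp [hlen])
    intro i h1 h2
    simp [List.getD_eq_getElem?_getD, h1]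
  | cons c cs ih =>
    intro k bs hlen
    have hmod : (PySem.Int.mod ((k : Int)) (L : Int)).toNat = k % L := by
      rw [PySem.Int.mod_natCast]; exact Int.toNat_natCast _
    have hcast : ((k : Int) + 1) = (((k + 1 : Nat)) : Int) := by push_cast; ring
    rw [PySem.List.enumerate_cons, List.foldl_cons]
    simp only [hmod, hcast]
    rw [ih (k + 1) _ (by simp [hlen])]
    apply List.map_congr_left
    intro j hj
    have hjL : j < L := List.mem_range.mp hj
    have hmL : k % L < L := Nat.mod_lt _ hL
    simp only [colFrom]
    by_cases hjk : k % L = j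
    · subst hjk
      rw [List.getD_eq_getElem?_getD, List.getElem?_set, if_pos rfl, if_pos (by omega)]
      simp
    · rw [List.getD_eq_getElem?_getD, List.getElem?_set, if_neg hjk, ← List.getD_eq_getElem?_getD]
      simp [if_neg hjk]

-- ===== VERDICT (by name: the statement is the Claim_ definition above) =====
theorem div_text_on_block_spec : Claim_equal_div_text_on_block := by
  intro text lenght _
  unfold Spec_div_text_on_block
  by_cases hneg : lenght ≤ 0
  · simp [div_text_on_block, div_text_on_block_alt, hneg, PySem.List.pyRange_one_eq_nil hneg]
  · replace hneg : 0 < lenght := lt_of_not_ge hneg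
    obtain ⟨L, rfl⟩ : ∃ L : Nat, lenght = (L : Int) := ⟨lenght.toNat, (Int.toNat_of_nonneg hneg.le).symm⟩
    have hL : 0 < L := by exact_mod_cast hneg
    simp only [div_text_on_block, div_text_on_block_alt, Int.toNat_natCast]
    rw [if_neg (by exact_mod_cast hneg.not_ge : ¬ ((L : Int) ≤ 0))]
    rw [PySem.List.pyRange_zero_natCast, List.foldl_map]
    rw [PySem.List.foldl_congr_mem _ _
      (fun (rez : List (List Char)) (jn : Nat) =>
        if (colFrom L jn 0 text.toList != []) = true then rez ++ [colFrom L jn 0 text.toList] else rez) _ ?_]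
    · rw [PySem.List.foldl_append_if, List.nil_append]
      have hb := buckets_invariant L hL text.toList 0 (List.replicate L []) (by simp)
      simp only [Nat.cast_zero] at hb
      rw [hb]
      have hrep : ∀ j : Nat, (List.replicate L ([] : List Char)).getD j [] = [] := by
        intro j
        simp only [List.getD_eq_getElem?_getD, List.getElem?_replicate]
        split <;> rfl
      simp only [hrep, List.nil_append]
      rw [List.filter_map]
      rfl
    · intro rez jn hjn
      have hcol := inner_eq_colFrom L hL text.toList jn (List.mem_range.mp hjn)
      dsimp only
      rw [hcol]
      by_cases h : colFrom L jn 0 text.toList = [] <;> simp [h]
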